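-- pv_equiv track=rewrite | github.com/Vidyasagar-Dadilwar/Design-Patterns | Codes(15.09.24)/22(file).py | restore
-- ===== SOURCE A (Python) =====
-- def fit(frags, candidate):
--     temp = frags.copy()
--     for i in range(1, len(candidate)):
--         if not temp:
--             break
--         prefix = candidate[:i]
--         suffix = candidate[i:]
--         temp = [x for x in temp if x.lower() != prefix.lower()]
--         temp = [x for x in temp if x.lower() != suffix.lower()]
--     return not temp
--
-- def restore(frags):
--     frags.sort(key=len)
--     largest = frags[-1]
--     smallest = [x for x in frags if len(x) == len(frags[0])]
--
--     for small in smallest: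
--         if fit(frags, largest + small):
--             return largest + small
--         elif fit(frags, small + largest):
--             return small + largest
--     return "Impossible"
-- ===== SOURCE B (Python) =====
-- def restore(frags):
--     # Note: like the original, this sorts `frags` in place (same observable mutation).
--     frags.sort(key=len)
--     largest = frags[-1]
--     lows = [x.lower() for x in frags]
--     min_len = len(frags[0])
--
--     def covers(candidate):
--         c = candidate.lower()
--         valid = set()
--         for i in range(1, len(c)):
--             valid.add(c[:i])
--             valid.add(c[i:])
--         return all(x in valid for x in lows)
--
--     candidates = [c for small in frags if len(small) == min_len
--                     for c in (largest + small, small + largest)]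
--     return next((c for c in candidates if covers(c)), "Impossible")
-- ===== Notes on version B (the rewrite author's own statement) =====
-- stated objective: alternative
-- what changed: fit's repeated per-split re-filtering of the fragment list is replaced by building one set of all lowered prefix/suffix splits of the candidate and testing every fragment's lowercase for membership, and the try-largest+small/small+largest loop becomes a first-match search over a flat candidate list; Pre_ excludes the empty list, on which both raise IndexError.
import Mathlib
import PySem

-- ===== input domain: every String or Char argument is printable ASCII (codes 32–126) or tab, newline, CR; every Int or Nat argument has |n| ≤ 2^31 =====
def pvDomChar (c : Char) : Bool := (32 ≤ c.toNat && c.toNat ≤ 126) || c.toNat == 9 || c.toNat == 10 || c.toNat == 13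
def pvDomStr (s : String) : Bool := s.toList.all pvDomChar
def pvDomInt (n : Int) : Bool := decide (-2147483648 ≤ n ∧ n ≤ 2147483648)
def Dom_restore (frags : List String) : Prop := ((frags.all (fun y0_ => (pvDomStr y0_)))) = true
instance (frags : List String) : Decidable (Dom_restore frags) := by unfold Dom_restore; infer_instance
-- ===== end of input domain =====

-- B replaces fit's repeated per-split re-filtering with one set of all lowered splits plus one
-- membership pass, and the try-each-small loop with a first-match search over a flat candidate list
-- (alternative decomposition, not measured faster). Both A and B sort `frags` in place (same
-- observable mutation); the equivalence proved is about the return value.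

-- ===== PORT A =====
-- temp = [x for x in temp if x.lower() != s.lower()]
def fitFilter (temp : List String) (s : String) : List String :=
  temp.filter (fun x => !(PySem.Str.lower x == PySem.Str.lower s))

def fit (frags : List String) (candidate : String) : Bool :=
  ((PySem.List.pyRange 1 (PySem.Str.len candidate) 1).foldl
    (fun temp i =>
      if temp.isEmpty then temp   -- Python's `break` when temp is empty: the remaining iterations do nothing
      else fitFilter (fitFilter temp (PySem.Str.slice candidate none (some i)))
                     (PySem.Str.slice candidate (some i) none))
    frags).isEmpty

-- the `for small in smallest` loop with its two-way if/elif and early return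
def restoreLoop (fs : List String) (largest : String) : List String → String
  | [] => "Impossible"
  | small :: rest =>
    if fit fs (largest ++ small) then largest ++ small
    else if fit fs (small ++ largest) then small ++ largest
    else restoreLoop fs largest rest

def restore (frags : List String) : String :=
  let fs := PySem.List.sorted frags (fun x => PySem.Str.len x)
  let largest := PySem.List.pyGetD fs (-1) ""    -- frags[-1]; IndexError on [] is excluded by Pre_
  let smallest := fs.filter (fun x => PySem.Str.len x == PySem.Str.len (PySem.List.pyGetD fs 0 ""))
  restoreLoop fs largest smallest

-- ===== PORT B =====
def covers (lows : List String) (candidate : String) : Bool :=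
  let c := PySem.Str.lower candidate
  let valid : PySem.Set String :=
    (PySem.List.pyRange 1 (PySem.Str.len c) 1).foldl
      (fun s i => PySem.Set.add (PySem.Set.add s (PySem.Str.slice c none (some i)))
                                (PySem.Str.slice c (some i) none))
      PySem.Set.empty
  lows.all (fun x => PySem.Set.contains valid x)

def restore_alt (frags : List String) : String :=
  let fs := PySem.List.sorted frags (fun x => PySem.Str.len x)
  let largest := PySem.List.pyGetD fs (-1) ""    -- frags[-1]; IndexError on [] is excluded by Pre_
  let lows := fs.map PySem.Str.lower
  let minLen := PySem.Str.len (PySem.List.pyGetD fs 0 "")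
  let candidates := (fs.filter (fun small => PySem.Str.len small == minLen)).flatMap
      (fun small => [largest ++ small, small ++ largest])
  ((candidates.find? (fun c => covers lows c)).getD "Impossible")

-- ===== PRECONDITION & SPEC =====
-- Pre_ excludes only the empty list, on which A raises IndexError at frags[-1] (B raises there too).
def Pre_restore (frags : List String) : Prop := frags ≠ []
instance (frags : List String) : Decidable (Pre_restore frags) := by unfold Pre_restore; infer_instance
def pvWitness_restore : List String := (["ab", "a", "b"])

def Spec_restore (frags : List String) (out : String) : Prop := out = restore_alt frags
instance (frags : List String) (out : String) : Decidable (Spec_restore frags out) := by unfold Spec_restore; infer_instance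

-- ===== CLAIM (what is proved, stated in full; the proofs are below) =====
def Claim_equal_restore : Prop := ∀ (frags : List String), Dom_restore frags → Pre_restore frags → Spec_restore frags (restore frags)

-- ===== LEMMAS AND PROOFS =====

-- the `break` guard is a no-op: once temp is empty every later iteration returns it unchanged
theorem foldl_guard (g : List String → Int → List String) (hg : ∀ i, g [] i = [])
    (R : List Int) (init : List String) :
    R.foldl (fun t i => if t.isEmpty then t else g t i) init = R.foldl g init := by
  induction R generalizing init with
  | nil => rfl
  | cons i R ih =>
    have hstep : (if init.isEmpty then init else g init i) = g init i := by
      cases init <;> simp [hg]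
    simp only [List.foldl_cons, hstep, ih]

-- the double filter fold is one filter by "survives every split"
theorem foldl_fitFilter (c : String) (R : List Int) (fs : List String) :
    R.foldl (fun t i => fitFilter (fitFilter t (PySem.Str.slice c none (some i)))
                                  (PySem.Str.slice c (some i) none)) fs
      = fs.filter (fun x => R.all (fun i =>
          !(PySem.Str.lower x == PySem.Str.lower (PySem.Str.slice c none (some i))) &&
          !(PySem.Str.lower x == PySem.Str.lower (PySem.Str.slice c (some i) none)))) := by
  induction R generalizing fs with
  | nil => simp
  | cons i R ih =>
    rw [List.foldl_cons, ih]
    simp only [fitFilter, List.filter_filter, List.all_cons]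
    apply List.filter_congr
    intro x _
    cases h1 : PySem.Str.lower x == PySem.Str.lower (PySem.Str.slice c none (some i)) <;>
      cases h2 : PySem.Str.lower x == PySem.Str.lower (PySem.Str.slice c (some i) none) <;> simp

theorem fit_iff (fs : List String) (c : String) :
    fit fs c = true ↔ ∀ x ∈ fs, ∃ i ∈ PySem.List.pyRange 1 (PySem.Str.len c) 1,
      PySem.Str.lower x = PySem.Str.lower (PySem.Str.slice c none (some i)) ∨
      PySem.Str.lower x = PySem.Str.lower (PySem.Str.slice c (some i) none) := by
  unfold fit
  rw [foldl_guard _ (fun i => rfl), foldl_fitFilter]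
  rw [List.isEmpty_iff, List.filter_eq_nil_iff]
  constructor
  · intro h x hx
    have := h x hx
    simp only [List.all_eq_true, Bool.and_eq_true, Bool.not_eq_eq_eq_not, Bool.not_true,
      beq_eq_false_iff_ne, ne_eq] at this
    push Not at this
    obtain ⟨i, hi, hor⟩ := this
    exact ⟨i, hi, by tauto⟩
  · intro h x hx
    obtain ⟨i, hi, hor⟩ := h x hx
    simp only [List.all_eq_true, Bool.and_eq_true, Bool.not_eq_eq_eq_not, Bool.not_true,
      beq_eq_false_iff_ne, ne_eq]
    push Not
    exact ⟨i, hi, by tauto⟩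

-- membership in the set built by the add-add fold
theorem mem_fold_add2 (f g : Int → String) (R : List Int) (s0 : PySem.Set String) (y : String) :
    y ∈ R.foldl (fun s i => PySem.Set.add (PySem.Set.add s (f i)) (g i)) s0 ↔
      y ∈ s0 ∨ ∃ i ∈ R, y = f i ∨ y = g i := by
  induction R generalizing s0 with
  | nil => simp
  | cons i R ih =>
    simp only [List.foldl_cons, ih, PySem.Set.mem_add, List.mem_cons]
    constructor
    · rintro (((h | h) | h) | ⟨j, hj, h⟩)
      · exact Or.inl h
      · exact Or.inr ⟨i, Or.inl rfl, Or.inl h⟩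
      · exact Or.inr ⟨i, Or.inl rfl, Or.inr h⟩
      · exact Or.inr ⟨j, Or.inr hj, h⟩
    · rintro (h | ⟨j, (rfl | hj), h⟩)
      · exact Or.inl (Or.inl (Or.inl h))
      · rcases h with h | h
        · exact Or.inl (Or.inl (Or.inr h))
        · exact Or.inl (Or.inr h)
      · exact Or.inr ⟨j, hj, h⟩

-- slicing commutes with lowercasing (splits of the lowered candidate ARE the lowered splits)
theorem slice_lower_to (c : String) (i : Int) (hi : 0 ≤ i) :
    PySem.Str.slice (PySem.Str.lower c) none (some i) = PySem.Str.lower (PySem.Str.slice c none (some i)) := by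
  rw [← String.toList_inj]
  simp only [PySem.Str.toList_slice, PySem.Str.toList_lower, PySem.Chars.slice_eq_listSlice,
    PySem.List.slice_to _ hi, PySem.Chars.lower, List.map_take]

theorem slice_lower_from (c : String) (i : Int) (hi : 0 ≤ i) :
    PySem.Str.slice (PySem.Str.lower c) (some i) none = PySem.Str.lower (PySem.Str.slice c (some i) none) := by
  rw [← String.toList_inj]
  simp only [PySem.Str.toList_slice, PySem.Str.toList_lower, PySem.Chars.slice_eq_listSlice,
    PySem.List.slice_from _ hi, PySem.Chars.lower, List.map_drop]

theorem len_lower (c : String) : PySem.Str.len (PySem.Str.lower c) = PySem.Str.len c := by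
  simp only [PySem.Str.len_eq, PySem.Str.toList_lower, PySem.Chars.lower, List.length_map]

theorem covers_iff (fs : List String) (c : String) :
    covers (fs.map PySem.Str.lower) c = true ↔ ∀ x ∈ fs, ∃ i ∈ PySem.List.pyRange 1 (PySem.Str.len c) 1,
      PySem.Str.lower x = PySem.Str.lower (PySem.Str.slice c none (some i)) ∨
      PySem.Str.lower x = PySem.Str.lower (PySem.Str.slice c (some i) none) := by
  unfold covers
  simp only [len_lower, List.all_eq_true, List.mem_map, PySem.Set.contains,
    List.contains_iff_mem, forall_exists_index, and_imp, forall_apply_eq_imp_iff₂]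
  constructor
  · intro h x hx
    have := h x hx
    rw [mem_fold_add2] at this
    rcases this with h0 | ⟨i, hi, hor⟩
    · simp [PySem.Set.empty] at h0
    · have h1 : (0:Int) ≤ i := by
        have := (PySem.List.mem_pyRange_one (x := i) (a := 1) (b := PySem.Str.len c)).mp hi
        omega
      refine ⟨i, hi, ?_⟩
      rcases hor with h | h
      · exact Or.inl (by rw [h, slice_lower_to c i h1])
      · exact Or.inr (by rw [h, slice_lower_from c i h1])
  · intro h x hx
    obtain ⟨i, hi, hor⟩ := h x hx
    have h1 : (0:Int) ≤ i := by
      have := (PySem.List.mem_pyRange_one (x := i) (a := 1) (b := PySem.Str.len c)).mp hi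
      omega
    rw [mem_fold_add2]
    refine Or.inr ⟨i, hi, ?_⟩
    rcases hor with h | h
    · exact Or.inl (by rw [h, slice_lower_to c i h1])
    · exact Or.inr (by rw [h, slice_lower_from c i h1])

theorem fit_eq_covers (fs : List String) (c : String) :
    fit fs c = covers (fs.map PySem.Str.lower) c := by
  rw [Bool.eq_iff_iff, fit_iff, covers_iff]

theorem restoreLoop_eq (fs : List String) (largest : String) (sm : List String) :
    restoreLoop fs largest sm
      = ((sm.flatMap (fun small => [largest ++ small, small ++ largest])).find?
          (fun c => covers (fs.map PySem.Str.lower) c)).getD "Impossible" := by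
  induction sm with
  | nil => rfl
  | cons small rest ih =>
    simp only [restoreLoop, List.flatMap_cons, List.cons_append, List.nil_append,
      List.find?_cons, fit_eq_covers]
    cases h1 : covers (fs.map PySem.Str.lower) (largest ++ small) <;>
      cases h2 : covers (fs.map PySem.Str.lower) (small ++ largest) <;>
        simp [ih]

-- ===== VERDICT (by name: the statement is the Claim_ definition above) =====
theorem restore_spec : Claim_equal_restore := by
  intro frags _ _
  unfold Spec_restore restore restore_alt
  simp only []
  exact restoreLoop_eq _ _ _
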